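-- pv_equiv track=rewrite | github.com/SalladShooter/ConlangDG | main.py | words_for_pattern
-- ===== SOURCE A (Python) =====
-- import itertools
--
-- def words_for_pattern(pattern, inventories):
--     pools = []
--     for symbol in pattern:
--         if symbol in inventories:
--             pools.append(inventories[symbol])
--         else:
--             pools.append([symbol])
--     for combo in itertools.product(*pools):
--         yield "".join(combo)
-- ===== SOURCE B (Python) =====
-- def words_for_pattern(pattern, inventories):
--     words = [""]
--     for symbol in reversed(pattern):
--         pool = inventories[symbol] if symbol in inventories else [symbol]
--         words = [c + w for c in pool for w in words]
--     yield from words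
-- ===== Notes on version B (the rewrite author's own statement) =====
-- stated objective: alternative
-- what changed: Replaces itertools.product over a prebuilt pools list with a right-to-left fold over the pattern that builds the suffix-word list back-to-front (words = [c + w for c in pool for w in words]), never materialising pools or combo tuples or calling join.
import Mathlib
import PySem

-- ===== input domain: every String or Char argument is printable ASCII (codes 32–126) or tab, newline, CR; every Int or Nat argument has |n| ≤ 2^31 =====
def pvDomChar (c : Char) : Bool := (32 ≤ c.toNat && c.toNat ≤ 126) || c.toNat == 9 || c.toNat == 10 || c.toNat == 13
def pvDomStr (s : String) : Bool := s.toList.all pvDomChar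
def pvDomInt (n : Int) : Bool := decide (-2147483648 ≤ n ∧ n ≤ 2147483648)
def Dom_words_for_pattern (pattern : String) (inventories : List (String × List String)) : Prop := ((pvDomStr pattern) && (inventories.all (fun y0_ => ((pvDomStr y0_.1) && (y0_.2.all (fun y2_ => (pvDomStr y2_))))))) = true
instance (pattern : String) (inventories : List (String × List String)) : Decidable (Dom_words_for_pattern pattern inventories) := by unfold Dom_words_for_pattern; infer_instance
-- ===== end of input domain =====

-- ===== PORT A =====
-- B replaces itertools.product with a recursive generator over pattern positions; objective: alternative decomposition, same cost.
-- The Python A is a generator; both programs are compared on the list of yielded words (no argument is mutated).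

-- helper: 'symbol in inventories' / 'inventories[symbol]' on the dict (first-match lookup)
def pvInvGet (inventories : List (String × List String)) (symbol : String) : Option (List String) :=
  (PySem.Dict.mk inventories).get? symbol

-- one step of itertools.product's odometer: extend every combo so far by each element of the next pool
def pvProdStep (acc : List (List String)) (pool : List String) : List (List String) :=
  acc.flatMap (fun combo => pool.map (fun x => combo ++ [x]))

def words_for_pattern (pattern : String) (inventories : List (String × List String)) : List String :=
  -- pools = []; for symbol in pattern: ... pools.append(...)
  let pools : List (List String) := pattern.toList.foldl (fun acc c =>
    let symbol := String.singleton c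
    match pvInvGet inventories symbol with
    | some v => acc ++ [v]
    | none   => acc ++ [[symbol]]) []
  -- for combo in itertools.product(*pools): yield "".join(combo)
  (pools.foldl pvProdStep [[]]).map (fun combo => PySem.Str.join "" combo)

-- ===== PORT B =====
-- words = [""]; for symbol in reversed(pattern): words = [c + w for c in pool for w in words]
def pvStep (inventories : List (String × List String)) (words : List String) (c : Char) : List String :=
  let symbol := String.singleton c
  let pool := (pvInvGet inventories symbol).getD [symbol]
  pool.flatMap (fun ch => words.map (fun w => ch ++ w))

def words_for_pattern_alt (pattern : String) (inventories : List (String × List String)) : List String :=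
  pattern.toList.reverse.foldl (pvStep inventories) [""]

-- ===== PRECONDITION & SPEC =====
def Spec_words_for_pattern (pattern : String) (inventories : List (String × List String)) (out : List String) : Prop := out = words_for_pattern_alt pattern inventories
instance (pattern : String) (inventories : List (String × List String)) (out : List String) : Decidable (Spec_words_for_pattern pattern inventories out) := by unfold Spec_words_for_pattern; infer_instance

-- ===== CLAIM (what is proved, stated in full; the proofs are below) =====
def Claim_equal_words_for_pattern : Prop := ∀ (pattern : String) (inventories : List (String × List String)), Dom_words_for_pattern pattern inventories → Spec_words_for_pattern pattern inventories (words_for_pattern pattern inventories)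

-- ===== LEMMAS AND PROOFS =====

-- joining with the empty separator is flattening
theorem pvJoin_nil_eq_flatten (l : List (List Char)) :
    PySem.Chars.join [] l = l.flatten := by
  induction l with
  | nil => simp [PySem.Chars.join_nil]
  | cons a t ih =>
    cases t with
    | nil => simp [PySem.Chars.join_singleton]
    | cons b r =>
      rw [PySem.Chars.join_cons_cons] at *
      simp_all

theorem pvJoin_snoc (l : List String) (x : String) :
    PySem.Str.join "" (l ++ [x]) = PySem.Str.join "" l ++ x := by
  apply String.toList_injective
  simp [PySem.Str.toList_join, pvJoin_nil_eq_flatten]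

-- A's product-then-join, from any accumulator, prepends each joined accumulator combo to B's suffix words
theorem pvProd_foldr (pools : List (List String))
    (acc : List (List String)) :
    (pools.foldl pvProdStep acc).map (fun combo => PySem.Str.join "" combo)
      = acc.flatMap (fun combo =>
          (pools.foldr (fun pool words => pool.flatMap (fun ch => words.map (fun w => ch ++ w))) [""]).map
            (fun w => PySem.Str.join "" combo ++ w)) := by
  induction pools generalizing acc with
  | nil =>
    induction acc with
    | nil => simp
    | cons a t iha => simpa using iha
  | cons p ps ih =>
    rw [List.foldl_cons, ih]
    simp only [pvProdStep, List.foldr_cons, List.flatMap_assoc, List.flatMap_map,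
      List.map_flatMap, List.map_map, pvJoin_snoc]
    simp [Function.comp_def, String.append_assoc]

-- the pool-building loop of A produces, pointwise, the pool B computes inline
theorem pvPools_eq (inventories : List (String × List String)) (cs : List Char)
    (acc : List (List String)) :
    cs.foldl (fun acc c =>
      let symbol := String.singleton c
      match pvInvGet inventories symbol with
      | some v => acc ++ [v]
      | none   => acc ++ [[symbol]]) acc
    = acc ++ cs.map (fun c =>
      let symbol := String.singleton c
      (pvInvGet inventories symbol).getD [symbol]) := by
  induction cs generalizing acc with
  | nil => simp
  | cons c t ih =>
    simp only [List.foldl_cons, List.map_cons, ih]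
    cases pvInvGet inventories (String.singleton c) <;> simp

-- ===== VERDICT (by name: the statement is the Claim_ definition above) =====
theorem words_for_pattern_spec : Claim_equal_words_for_pattern := by
  intro pattern inventories _
  unfold Spec_words_for_pattern words_for_pattern words_for_pattern_alt
  rw [pvPools_eq, pvProd_foldr, List.foldl_reverse]
  simp [pvStep, PySem.Str.join, PySem.Chars.join_nil, List.foldr_map]
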